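-- pv_equiv track=rewrite | github.com/DorianPRJ7/IA-ChessQuito | ChessQuitto/chessQuitto_alpha_beta.py | penalite_proximite
-- ===== SOURCE A (Python) =====
-- def positions_pieces(jeu, couleur):
--     positions = []
--     for i in range(4):
--         for j in range(4):
--             piece=jeu[i][j]
--             if (piece!='.') and (piece[0]==couleur):
--                 positions+=[(i,j)]
--     return positions
--
-- def penalite_proximite(jeu, couleur):
--     penalite = 0
--     if(couleur=='B'):
--         ennemis = positions_pieces(jeu, 'N')
--     else:
--         ennemis = positions_pieces(jeu, 'B')
--     allies  = positions_pieces(jeu, couleur)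
--     for pos1 in allies:
--         i1=pos1[0]
--         j1=pos1[1]
--         piece_allie=jeu[i1][j1]
--         for pos2 in ennemis:
--             i2=pos2[0]
--             j2=pos2[1]
--             if max(abs(i1-i2), abs(j1-j2)) == 1:
--                 if piece_allie[1:] == 'RR' or piece_allie[1:] == 'R':
--                     penalite += 6
--                 else:
--                     penalite += 3
--
--     return penalite
-- ===== SOURCE B (Python) =====
-- def penalite_proximite(jeu, couleur):
--     ennemi = 'N' if couleur == 'B' else 'B'
--     penalite = 0
--     for i in range(4):
--         for j in range(4):
--             piece = jeu[i][j]
--             if piece == '.' or piece[0] != couleur: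
--                 continue
--             value = 6 if piece[1:] == 'RR' or piece[1:] == 'R' else 3
--             for di in (-1, 0, 1):
--                 for dj in (-1, 0, 1):
--                     if di == 0 and dj == 0:
--                         continue
--                     ni = i + di
--                     nj = j + dj
--                     if 0 <= ni < 4 and 0 <= nj < 4:
--                         voisin = jeu[ni][nj]
--                         if voisin != '.' and voisin[0] == ennemi:
--                             penalite += value
--     return penalite
-- ===== Notes on version B (the rewrite author's own statement) =====
-- stated objective: alternative
-- what changed: Instead of building ally and enemy position lists and scanning every ally-enemy pair with a Chebyshev-distance test, B makes a single pass over the 16 board cells and, for each ally, probes the 8 neighbouring cells directly on the board for enemy pieces.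
import Mathlib
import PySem

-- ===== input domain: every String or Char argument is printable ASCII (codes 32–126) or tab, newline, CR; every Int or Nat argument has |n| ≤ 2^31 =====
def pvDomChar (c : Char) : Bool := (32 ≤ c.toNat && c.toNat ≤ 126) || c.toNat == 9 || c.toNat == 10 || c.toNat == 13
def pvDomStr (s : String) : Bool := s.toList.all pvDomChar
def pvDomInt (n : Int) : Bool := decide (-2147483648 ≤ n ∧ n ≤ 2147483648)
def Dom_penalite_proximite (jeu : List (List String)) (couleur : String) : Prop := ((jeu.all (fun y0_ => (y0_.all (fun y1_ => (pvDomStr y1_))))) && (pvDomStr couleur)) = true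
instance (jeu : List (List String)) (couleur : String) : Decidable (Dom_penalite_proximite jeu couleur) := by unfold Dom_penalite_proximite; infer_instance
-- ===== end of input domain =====

-- B replaces A's pairwise ally×enemy Chebyshev-distance scan over collected position
-- lists by a single pass over the 16 cells probing the 8 neighbours of each ally
-- directly on the board (alternative decomposition; same result).


-- ===== PORT A =====
-- jeu[i][j]  (both Pythons read cells exactly like this; the defaults are unreachable
-- under Pre_, outside which Python raises IndexError)
def pvCell (jeu : List (List String)) (i j : Int) : String :=
  (PySem.List.pyGet? ((PySem.List.pyGet? jeu i).getD []) j).getD ""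

-- piece[0] == c  (none = IndexError on "", excluded by Pre_)
def pvIsCol (s : String) (c : String) : Bool :=
  match PySem.Str.pyGet? s 0 with
  | some ch => String.ofList [ch] == c
  | none => false

-- piece != '.' and piece[0] == c
def pvGood (jeu : List (List String)) (c : String) (i j : Int) : Bool :=
  (pvCell jeu i j != ".") && pvIsCol (pvCell jeu i j) c

-- piece[1:] == 'RR' or piece[1:] == 'R'
def pvRookStr (s : String) : Bool :=
  (PySem.Str.slice s (some 1) none == "RR") || (PySem.Str.slice s (some 1) none == "R")

def positions_pieces (jeu : List (List String)) (couleur : String) : List (Int × Int) :=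
  (PySem.List.pyRange 0 4 1).foldl (fun positions i =>
    (PySem.List.pyRange 0 4 1).foldl (fun positions j =>
      if pvGood jeu couleur i j then positions ++ [(i, j)] else positions) positions) []

def penalite_proximite (jeu : List (List String)) (couleur : String) : Int :=
  let ennemis := if couleur == "B" then positions_pieces jeu "N" else positions_pieces jeu "B"
  let allies := positions_pieces jeu couleur
  allies.foldl (fun pen pos1 =>
    let piece_allie := pvCell jeu pos1.1 pos1.2
    ennemis.foldl (fun pen pos2 =>
      if max (pos1.1 - pos2.1).natAbs (pos1.2 - pos2.2).natAbs == 1 then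
        (if pvRookStr piece_allie then pen + 6 else pen + 3)
      else pen) pen) 0

-- ===== PORT B =====
def penalite_proximite_alt (jeu : List (List String)) (couleur : String) : Int :=
  let ennemi := if couleur == "B" then "N" else "B"
  (PySem.List.pyRange 0 4 1).foldl (fun pen i =>
    (PySem.List.pyRange 0 4 1).foldl (fun pen j =>
      let piece := pvCell jeu i j
      if piece == "." || !pvIsCol piece couleur then pen
      else
        let value : Int := if pvRookStr piece then 6 else 3
        ([-1, 0, 1] : List Int).foldl (fun pen di =>
          ([-1, 0, 1] : List Int).foldl (fun pen dj =>
            if di == 0 && dj == 0 then pen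
            else
              let ni := i + di
              let nj := j + dj
              if 0 ≤ ni ∧ ni < 4 ∧ 0 ≤ nj ∧ nj < 4 then
                (if pvGood jeu ennemi ni nj then pen + value else pen)
              else pen) pen) pen) pen) 0

-- ===== PRECONDITION & SPEC =====
-- Pre_ excludes exactly the inputs where the Python A raises IndexError: a board with
-- fewer than 4 rows, a row among the first 4 with fewer than 4 cells, or an empty
-- string cell inside the 4x4 area (piece[0] raises there).
def Pre_penalite_proximite (jeu : List (List String)) (couleur : String) : Prop :=
  4 ≤ jeu.length ∧ ∀ row ∈ jeu.take 4, 4 ≤ row.length ∧ ∀ s ∈ row.take 4, s ≠ ""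
instance (jeu : List (List String)) (couleur : String) : Decidable (Pre_penalite_proximite jeu couleur) := by unfold Pre_penalite_proximite; infer_instance

def pvWitness_penalite_proximite : List (List String) × String :=
  ([["BR", ".", "NR", "."], [".", "BP", ".", "N"], ["B", "NRR", ".", "."], [".", ".", ".", "BX"]], "B")

def Spec_penalite_proximite (jeu : List (List String)) (couleur : String) (out : Int) : Prop := out = penalite_proximite_alt jeu couleur
instance (jeu : List (List String)) (couleur : String) (out : Int) : Decidable (Spec_penalite_proximite jeu couleur out) := by unfold Spec_penalite_proximite; infer_instance

-- ===== CLAIM (what is proved, stated in full; the proofs are below) =====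
def Claim_equal_penalite_proximite : Prop := ∀ (jeu : List (List String)) (couleur : String), Dom_penalite_proximite jeu couleur → Pre_penalite_proximite jeu couleur → Spec_penalite_proximite jeu couleur (penalite_proximite jeu couleur)

-- ===== LEMMAS AND PROOFS =====

lemma pvRange4 : PySem.List.pyRange 0 4 1 = [0, 1, 2, 3] := by decide

-- A's position collector is the row-major filtered list of good cells
lemma pvPositions_eq (jeu : List (List String)) (c : String) :
    positions_pieces jeu c =
      ([0, 1, 2, 3] : List Int).flatMap (fun i =>
        ((([0, 1, 2, 3] : List Int).filter (fun j => pvGood jeu c i j)).map (fun j => (i, j)))) := by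
  unfold positions_pieces
  rw [pvRange4]
  simp only [PySem.List.foldl_append_if]
  rw [PySem.List.foldl_append_eq_flatMap]
  simp

-- A's inner enemy loop as an accumulator-free sum
lemma pvLA (E : List (Int × Int)) (r : Bool) (i j pen : Int) :
    E.foldl (fun pen pos2 =>
      if max (i - pos2.1).natAbs (j - pos2.2).natAbs == 1 then
        (if r then pen + 6 else pen + 3) else pen) pen
    = pen + (E.map (fun pos2 =>
        if max (i - pos2.1).natAbs (j - pos2.2).natAbs == 1 then
          (if r then (6 : Int) else 3) else 0)).sum := by
  have h : (fun (pen : Int) (pos2 : Int × Int) =>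
      if max (i - pos2.1).natAbs (j - pos2.2).natAbs == 1 then
        (if r then pen + 6 else pen + 3) else pen)
      = fun (pen : Int) pos2 => pen + (if max (i - pos2.1).natAbs (j - pos2.2).natAbs == 1 then
          (if r then (6 : Int) else 3) else 0) := by
    funext pen pos2; split_ifs <;> ring
  rw [h, PySem.List.foldl_add]

-- B's innermost neighbour loop as an accumulator-free sum
lemma pvL1 (jeu : List (List String)) (e : String) (value : Int) (i j di pen : Int) :
    ([-1, 0, 1] : List Int).foldl (fun pen dj =>
      if di == 0 && dj == 0 then pen
      else
        if 0 ≤ i + di ∧ i + di < 4 ∧ 0 ≤ j + dj ∧ j + dj < 4 then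
          (if pvGood jeu e (i + di) (j + dj) then pen + value else pen)
        else pen) pen
    = pen + (([-1, 0, 1] : List Int).map (fun dj =>
        if di == 0 && dj == 0 then (0 : Int)
        else if 0 ≤ i + di ∧ i + di < 4 ∧ 0 ≤ j + dj ∧ j + dj < 4 then
          (if pvGood jeu e (i + di) (j + dj) then value else 0)
        else 0)).sum := by
  have h : (fun (pen : Int) dj =>
      if di == 0 && dj == 0 then pen
      else
        if 0 ≤ i + di ∧ i + di < 4 ∧ 0 ≤ j + dj ∧ j + dj < 4 then
          (if pvGood jeu e (i + di) (j + dj) then pen + value else pen)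
        else pen)
      = fun (pen : Int) dj => pen + (if di == 0 && dj == 0 then (0 : Int)
        else if 0 ≤ i + di ∧ i + di < 4 ∧ 0 ≤ j + dj ∧ j + dj < 4 then
          (if pvGood jeu e (i + di) (j + dj) then value else 0)
        else 0) := by
    funext pen dj; split_ifs <;> ring
  rw [h, PySem.List.foldl_add]

lemma pvIteAdd (c : Prop) [Decidable c] (pen s : Int) :
    (if c then pen else pen + s) = pen + (if c then 0 else s) := by split_ifs <;> ring

lemma pvGuard (s : String) (b : Bool) (X : Int) :
    (if s = "." ∨ b = false then (0 : Int) else X) = (if ¬s = "." ∧ b = true then X else 0) := by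
  by_cases h1 : s = "." <;> by_cases h2 : b <;> simp [h1, h2]

lemma pvSumMapFilter (l : List Int) (p : Int → Bool) (f : Int → Int) :
    ((l.filter p).map f).sum = (l.map (fun x => if p x then f x else 0)).sum := by
  induction l with
  | nil => simp
  | cons a t ih => by_cases h : p a <;> simp [h, ih]

-- ===== VERDICT (by name: the statement is the Claim_ definition above) =====
set_option maxHeartbeats 2000000 in
theorem penalite_proximite_spec : Claim_equal_penalite_proximite := by
  intro jeu couleur _ _
  unfold Spec_penalite_proximite
  rw [show penalite_proximite jeu couleur =
      ((if couleur == "B" then positions_pieces jeu "N" else positions_pieces jeu "B") |> fun ennemis =>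
       (positions_pieces jeu couleur).foldl (fun pen pos1 =>
         ennemis.foldl (fun pen pos2 =>
           if max (pos1.1 - pos2.1).natAbs (pos1.2 - pos2.2).natAbs == 1 then
             (if pvRookStr (pvCell jeu pos1.1 pos1.2) then pen + 6 else pen + 3)
           else pen) pen) 0) from rfl]
  rw [← apply_ite (positions_pieces jeu)]
  simp only [pvPositions_eq]
  simp only [pvLA, PySem.List.foldl_add]
  simp only [penalite_proximite_alt, pvRange4]
  simp only [pvL1, PySem.List.foldl_add]
  simp only [pvIteAdd, PySem.List.foldl_add]
  simp only [List.flatMap_def, List.map_flatten, List.sum_flatten, List.map_map, Function.comp_def]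
  simp only [pvSumMapFilter]
  simp only [pvGood]
  simp [pvGuard]
  ring_nf
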